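-- pv_equiv track=rewrite | github.com/Bruce1165/sanford | scripts/phase1_cup_formation_analysis.py | get_screener_triggers_for_stock
-- ===== SOURCE A (Python) =====
-- from typing import Dict, List, Optional, Tuple
--
-- def get_screener_triggers_for_stock(code: str, timeline: Dict[str, Dict[str, List[str]]]) -> Dict[str, List[str]]:
--     """
--     Extract screener trigger dates for a specific stock from the timeline
--
--     Returns: {screener_name: [date1, date2, ...]}
--     """
--     screener_triggers = {}
--
--     for date_str, screener_results in timeline.items():
--         for screener_name, stock_codes in screener_results.items():
--             if code in stock_codes:
--                 if screener_name not in screener_triggers: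
--                     screener_triggers[screener_name] = []
--                 screener_triggers[screener_name].append(date_str)
--
--     # Sort dates for each screener
--     for screener_name in screener_triggers:
--         screener_triggers[screener_name].sort()
--
--     return screener_triggers
-- ===== SOURCE B (Python) =====
-- def get_screener_triggers_for_stock(code, timeline):
--     # Phase 1: discover screener names in first-trigger order.
--     names = []
--     for screener_results in timeline.values():
--         for name, codes in screener_results.items():
--             if code in codes and name not in names:
--                 names.append(name)
--     # Phase 2: per screener, collect its trigger dates in one sorted comprehension.
--     return {name: sorted(date for date, res in timeline.items()
--                          if code in res.get(name, []))
--             for name in names}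
-- ===== Notes on version B (the rewrite author's own statement) =====
-- stated objective: alternative
-- what changed: B replaces A's incremental dict-of-accumulators with trailing in-place sorts by a two-phase decomposition: first discover screener names in first-trigger order, then build each screener's list directly as one sorted comprehension over the timeline.
import Mathlib
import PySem

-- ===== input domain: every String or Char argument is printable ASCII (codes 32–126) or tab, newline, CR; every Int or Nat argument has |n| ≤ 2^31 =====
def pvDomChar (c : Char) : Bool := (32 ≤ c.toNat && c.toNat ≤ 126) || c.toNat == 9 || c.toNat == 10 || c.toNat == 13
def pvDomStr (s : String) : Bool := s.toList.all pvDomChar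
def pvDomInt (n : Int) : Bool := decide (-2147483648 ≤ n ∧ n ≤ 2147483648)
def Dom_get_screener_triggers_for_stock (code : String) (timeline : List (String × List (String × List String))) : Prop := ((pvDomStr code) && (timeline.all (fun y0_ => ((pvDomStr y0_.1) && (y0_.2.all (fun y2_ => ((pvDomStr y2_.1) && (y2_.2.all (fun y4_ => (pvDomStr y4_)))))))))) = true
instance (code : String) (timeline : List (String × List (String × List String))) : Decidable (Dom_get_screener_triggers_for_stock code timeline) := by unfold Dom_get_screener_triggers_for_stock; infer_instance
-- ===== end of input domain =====

-- B rebuilds the result as a two-phase name-discovery + per-screener sorted comprehension instead of A's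
-- incremental dict with trailing in-place sorts (objective: alternative; same return value).

-- ===== PORT A =====
-- inner loop over one date's screener_results
def pvAInner (code date : String) (res : List (String × List String))
    (d : PySem.Dict String (List String)) : PySem.Dict String (List String) :=
  res.foldl (fun d q =>
    if code ∈ q.2 then
      (if d.contains q.1 then d else d.insert q.1 []).modify q.1 [] (fun v => v ++ [date])
    else d) d

def get_screener_triggers_for_stock (code : String) (timeline : List (String × List (String × List String))) : List (String × List String) :=
  let d := timeline.foldl (fun d p => pvAInner code p.1 p.2 d) PySem.Dict.empty
  -- Sort dates for each screener (in-place .sort() → modify over the dict's own keys)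
  let d := d.keys.foldl (fun d n => d.modify n [] (fun v => PySem.List.sorted v (fun x => x) false)) d
  d.items

-- ===== PORT B =====
-- Phase 1: discover screener names in first-trigger order
def pvBNames (code : String) (timeline : List (String × List (String × List String))) : List String :=
  timeline.foldl (fun ns p =>
    p.2.foldl (fun ns q =>
      if code ∈ q.2 ∧ q.1 ∉ ns then ns ++ [q.1] else ns) ns) []

def get_screener_triggers_for_stock_alt (code : String) (timeline : List (String × List (String × List String))) : List (String × List String) :=
  (pvBNames code timeline).map (fun n =>
    (n, PySem.List.sorted
          ((timeline.filter (fun p => decide (code ∈ (PySem.Dict.mk p.2).getD n []))).map (fun p => p.1))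
          (fun x => x) false))

-- ===== PRECONDITION & SPEC =====
-- Pre_ only states what is true of every real Python input: dict keys are unique (both the timeline's
-- date keys and each date's screener-name keys); a Python dict cannot carry duplicate keys at all.
def Pre_get_screener_triggers_for_stock (code : String) (timeline : List (String × List (String × List String))) : Prop :=
  (timeline.map (fun p => p.1)).Nodup ∧ ∀ p ∈ timeline, (p.2.map (fun q => q.1)).Nodup
instance (code : String) (timeline : List (String × List (String × List String))) : Decidable (Pre_get_screener_triggers_for_stock code timeline) := by unfold Pre_get_screener_triggers_for_stock; infer_instance
def pvWitness_get_screener_triggers_for_stock : String × (List (String × List (String × List String))) :=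
  ("X", [("2024-01-02", [("scr", ["X", "Y"])]), ("2024-01-01", [("scr", ["X"]), ("other", ["Z"])])])
def Spec_get_screener_triggers_for_stock (code : String) (timeline : List (String × List (String × List String))) (out : List (String × List String)) : Prop := out = get_screener_triggers_for_stock_alt code timeline
instance (code : String) (timeline : List (String × List (String × List String))) (out : List (String × List String)) : Decidable (Spec_get_screener_triggers_for_stock code timeline out) := by unfold Spec_get_screener_triggers_for_stock; infer_instance

-- ===== CLAIM (what is proved, stated in full; the proofs are below) =====
def Claim_equal_get_screener_triggers_for_stock : Prop := ∀ (code : String) (timeline : List (String × List (String × List String))), Dom_get_screener_triggers_for_stock code timeline → Pre_get_screener_triggers_for_stock code timeline → Spec_get_screener_triggers_for_stock code timeline (get_screener_triggers_for_stock code timeline)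

-- ===== LEMMAS AND PROOFS =====

-- A's loop body at one (name, codes) pair that triggers: value and key effect.
theorem pvStep_getD (date k n : String) (d : PySem.Dict String (List String)) :
    ((if d.contains k then d else d.insert k []).modify k [] (fun w => w ++ [date])).getD n []
    = if n = k then d.getD k [] ++ [date] else d.getD n [] := by
  by_cases hct : d.contains k = true
  · rw [if_pos hct, PySem.Dict.getD_modify]
  · have hcf : d.contains k = false := by simpa using hct
    rw [if_neg hct, PySem.Dict.getD_modify]
    rw [PySem.Dict.getD_of_not_contains d [] hcf]
    by_cases hn : n = k
    · subst hn; simp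
    · simp [hn, PySem.Dict.getD_insert]

theorem pvStep_keys (date k : String) (d : PySem.Dict String (List String)) :
    ((if d.contains k then d else d.insert k []).modify k [] (fun w => w ++ [date])).keys
    = if k ∈ d.keys then d.keys else d.keys ++ [k] := by
  by_cases hct : d.contains k = true
  · have hmem : k ∈ d.keys := (PySem.Dict.contains_iff_mem_keys d k).1 hct
    rw [if_pos hct, if_pos hmem, PySem.Dict.keys_modify,
        PySem.Dict.keys_insert_of_contains _ _ hct]
  · have hcf : d.contains k = false := by simpa using hct
    have hmem : k ∉ d.keys := fun hm => hct ((PySem.Dict.contains_iff_mem_keys d k).2 hm)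
    rw [if_neg hct, if_neg hmem, PySem.Dict.keys_modify,
        PySem.Dict.keys_insert_of_contains _ _ (PySem.Dict.contains_insert_self d k []),
        PySem.Dict.keys_insert_of_not_contains _ _ hcf]

-- A's per-date inner loop: effect on the value stored at one screener name n.
theorem pvAInner_getD (code date n : String) (res : List (String × List String)) :
    ∀ (d : PySem.Dict String (List String)), (res.map (fun q => q.1)).Nodup →
    (pvAInner code date res d).getD n [] =
      d.getD n [] ++ (if code ∈ (PySem.Dict.mk res).getD n [] then [date] else []) := by
  induction res with
  | nil =>
      intro d _
      have hc : (PySem.Dict.mk ([] : List (String × List String))).getD n [] = [] := by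
        apply PySem.Dict.getD_of_not_contains
        simp [PySem.Dict.contains_mk]
      simp [pvAInner, hc]
  | cons q rest ih =>
      intro d hnd
      obtain ⟨k, v⟩ := q
      simp only [List.map_cons, List.nodup_cons, List.mem_map] at hnd
      obtain ⟨hk, hrest⟩ := hnd
      have hstep : (pvAInner code date ((k, v) :: rest) d)
          = pvAInner code date rest
              (if code ∈ v then
                (if d.contains k then d else d.insert k []).modify k [] (fun w => w ++ [date])
               else d) := by
        simp [pvAInner]
      rw [hstep, ih _ hrest]
      by_cases hn : n = k
      · have hrest0 : (PySem.Dict.mk rest).getD n [] = [] := by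
          apply PySem.Dict.getD_of_not_contains
          simp only [PySem.Dict.contains_mk, List.any_eq_false]
          intro p hp
          simp only [beq_iff_eq]
          exact fun h => hk ⟨p, hp, by rw [h, hn]⟩
        have hcons : (PySem.Dict.mk ((k, v) :: rest)).getD n [] = v := by
          rw [PySem.Dict.getD_eq_get?_getD, PySem.Dict.get?_mk_cons]
          simp [hn]
        rw [hrest0]
        by_cases hcv : code ∈ v
        · rw [if_pos hcv, pvStep_getD, if_pos hn, hcons, if_pos hcv, hn]
          simp
        · rw [if_neg hcv, hcons, if_neg hcv]
          simp
      · have hcons : (PySem.Dict.mk ((k, v) :: rest)).getD n [] = (PySem.Dict.mk rest).getD n [] := by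
          rw [PySem.Dict.getD_eq_get?_getD, PySem.Dict.get?_mk_cons, PySem.Dict.getD_eq_get?_getD]
          simp [Ne.symm hn]
        rw [hcons]
        by_cases hcv : code ∈ v
        · rw [if_pos hcv, pvStep_getD, if_neg hn]
        · rw [if_neg hcv]

-- A's main loop: the value stored at n is the dates (timeline order) on which n triggers for code.
theorem pvALoop_getD (code n : String) (tl : List (String × List (String × List String))) :
    ∀ (d : PySem.Dict String (List String)), (∀ p ∈ tl, (p.2.map (fun q => q.1)).Nodup) →
    (tl.foldl (fun d p => pvAInner code p.1 p.2 d) d).getD n [] =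
      d.getD n [] ++
        (tl.filter (fun p => decide (code ∈ (PySem.Dict.mk p.2).getD n []))).map (fun p => p.1) := by
  induction tl with
  | nil => intro d _; simp
  | cons p tl ih =>
      intro d hnd
      have h1 := pvAInner_getD code p.1 n p.2 d (hnd p (by simp))
      simp only [List.foldl_cons]
      rw [ih _ (fun q hq => hnd q (by simp [hq])), h1]
      by_cases hc : code ∈ (PySem.Dict.mk p.2).getD n []
      · simp [hc, List.append_assoc]
      · simp [hc]

-- Keys of A's inner loop evolve exactly as B's name-discovery step.
theorem pvAInner_keys (code date : String) (res : List (String × List String)) :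
    ∀ (d : PySem.Dict String (List String)),
    (pvAInner code date res d).keys =
      res.foldl (fun ns q => if code ∈ q.2 ∧ q.1 ∉ ns then ns ++ [q.1] else ns) d.keys := by
  induction res with
  | nil => intro d; simp [pvAInner]
  | cons q rest ih =>
      intro d
      obtain ⟨k, v⟩ := q
      have hstep : (pvAInner code date ((k, v) :: rest) d)
          = pvAInner code date rest
              (if code ∈ v then
                (if d.contains k then d else d.insert k []).modify k [] (fun w => w ++ [date])
               else d) := by
        simp [pvAInner]
      rw [hstep, ih]
      have hkeys : (if code ∈ v then
                (if d.contains k then d else d.insert k []).modify k [] (fun w => w ++ [date])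
               else d).keys = if code ∈ v ∧ k ∉ d.keys then d.keys ++ [k] else d.keys := by
        by_cases hcv : code ∈ v
        · rw [if_pos hcv, pvStep_keys]
          by_cases hm : k ∈ d.keys
          · rw [if_pos hm, if_neg (by simp [hm])]
          · rw [if_neg hm, if_pos ⟨hcv, hm⟩]
        · rw [if_neg hcv, if_neg (by simp [hcv])]
      rw [hkeys]
      simp only [List.foldl_cons]

-- Keys of A's main loop are exactly B's discovered names (from an arbitrary start).
theorem pvALoop_keys (code : String) (tl : List (String × List (String × List String))) :
    ∀ (d : PySem.Dict String (List String)),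
    (tl.foldl (fun d p => pvAInner code p.1 p.2 d) d).keys =
      tl.foldl (fun ns p =>
        p.2.foldl (fun ns q => if code ∈ q.2 ∧ q.1 ∉ ns then ns ++ [q.1] else ns) ns) d.keys := by
  induction tl with
  | nil => intro d; rfl
  | cons p tl ih =>
      intro d
      simp only [List.foldl_cons]
      rw [ih, pvAInner_keys]

-- B's name-discovery only appends fresh names, so it preserves Nodup.
theorem pvNamesInner_nodup (code : String) (res : List (String × List String)) :
    ∀ (ns : List String), ns.Nodup →
    (res.foldl (fun ns q => if code ∈ q.2 ∧ q.1 ∉ ns then ns ++ [q.1] else ns) ns).Nodup := by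
  induction res with
  | nil => intro ns h; exact h
  | cons q rest ih =>
      intro ns h
      simp only [List.foldl_cons]
      apply ih
      by_cases hc : code ∈ q.2 ∧ q.1 ∉ ns
      · rw [if_pos hc]
        simp only [List.nodup_append, List.nodup_singleton, true_and]
        refine ⟨h, fun a ha b hb he => ?_⟩
        simp only [List.mem_singleton] at hb
        exact hc.2 (hb ▸ he ▸ ha)
      · rw [if_neg hc]; exact h

theorem pvNames_nodup (code : String) (tl : List (String × List (String × List String))) :
    ∀ (ns : List String), ns.Nodup →
    (tl.foldl (fun ns p =>
        p.2.foldl (fun ns q => if code ∈ q.2 ∧ q.1 ∉ ns then ns ++ [q.1] else ns) ns) ns).Nodup := by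
  induction tl with
  | nil => intro ns h; exact h
  | cons p tl ih =>
      intro ns h
      simp only [List.foldl_cons]
      exact ih _ (pvNamesInner_nodup code p.2 ns h)

-- The trailing sort loop: getD after modifying each key of a Nodup key list once.
theorem pvSortLoop_getD (f : List String → List String) (ks : List String) :
    ∀ (d : PySem.Dict String (List String)) (n : String), ks.Nodup →
    (ks.foldl (fun d k => d.modify k [] f) d).getD n [] =
      if n ∈ ks then f (d.getD n []) else d.getD n [] := by
  induction ks with
  | nil => intro d n _; simp
  | cons k ks ih =>
      intro d n hnd
      simp only [List.nodup_cons] at hnd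
      simp only [List.foldl_cons]
      rw [ih _ _ hnd.2]
      by_cases hn : n = k
      · subst hn
        simp [hnd.1]
      · rw [PySem.Dict.getD_modify]
        simp [hn, List.mem_cons]

-- The trailing sort loop does not change the key list (all keys are present).
theorem pvSortLoop_keys (f : List String → List String) (ks : List String) :
    ∀ (d : PySem.Dict String (List String)), (∀ k ∈ ks, d.contains k = true) →
    (ks.foldl (fun d k => d.modify k [] f) d).keys = d.keys := by
  induction ks with
  | nil => intro d _; rfl
  | cons k ks ih =>
      intro d hct
      simp only [List.foldl_cons]
      have hk : (d.modify k [] f).keys = d.keys := by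
        rw [PySem.Dict.keys_modify, PySem.Dict.keys_insert_of_contains _ _ (hct k (by simp))]
      rw [ih _ ?_, hk]
      intro k' hk'
      rw [PySem.Dict.contains_eq_decide_mem_keys, hk]
      have := hct k' (by simp [hk'])
      rw [PySem.Dict.contains_eq_decide_mem_keys] at this
      exact this

-- ===== VERDICT (by name: the statement is the Claim_ definition above) =====
theorem get_screener_triggers_for_stock_spec : Claim_equal_get_screener_triggers_for_stock := by
  intro code timeline _ hpre
  obtain ⟨hdates, hscreens⟩ := hpre
  unfold Spec_get_screener_triggers_for_stock
  unfold get_screener_triggers_for_stock get_screener_triggers_for_stock_alt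
  set d1 := timeline.foldl (fun d p => pvAInner code p.1 p.2 d) PySem.Dict.empty with hd1
  have hkeys : d1.keys = pvBNames code timeline := by
    rw [hd1, pvALoop_keys, PySem.Dict.keys_empty]; rfl
  have hknd : d1.keys.Nodup := by
    rw [hkeys]
    exact pvNames_nodup code timeline [] List.nodup_nil
  have hgetD : ∀ n, d1.getD n [] =
      (timeline.filter (fun p => decide (code ∈ (PySem.Dict.mk p.2).getD n []))).map (fun p => p.1) := by
    intro n
    rw [hd1, pvALoop_getD code n timeline PySem.Dict.empty hscreens, PySem.Dict.getD_empty]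
    simp
  set f : List String → List String := fun v => PySem.List.sorted v (fun x => x) false with hf
  set d2 := d1.keys.foldl (fun d n => d.modify n [] f) d1 with hd2
  have hcont : ∀ k ∈ d1.keys, d1.contains k = true :=
    fun k hk => (PySem.Dict.contains_iff_mem_keys d1 k).2 hk
  have hk2 : d2.keys = d1.keys := by rw [hd2]; exact pvSortLoop_keys f d1.keys d1 hcont
  have hnd2 : d2.keys.Nodup := by rw [hk2]; exact hknd
  rw [PySem.Dict.items_eq_map_keys d2 hnd2 [], hk2, hkeys]
  apply List.map_congr_left
  intro n hn
  have hn' : n ∈ d1.keys := by rw [hkeys]; exact hn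
  rw [hd2, pvSortLoop_getD f d1.keys d1 n hknd, if_pos hn', hgetD n]
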